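-- pv_equiv track=rewrite | github.com/CS-433/ml-project-2-xgradingboosting | src/lib/clusters_utils.py | first_fit_strategy
-- ===== SOURCE A (Python) =====
-- from collections import Counter
-- import functools
-- import operator
--
-- def first_fit_strategy(components, k):
--     """
--
--     Args:
--         components: An array mappping each sample to an indexed connected component
--         k: the number of folds to fill
--
--     Returns: an assignement of each sample to a fold trying to fill the folds as evenly as possible and such that every samples
--     that are in the same connected component are in the same fold
--
--     """
--     integers = Counter(components)
--     sorted_components = sorted(integers.items(), key=lambda item: item[1], reverse=True)
--     final_dict = {}
--     for i, p in enumerate(sorted_components):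
--         final_dict.setdefault(i % k, []).append(p[0])
--
--     element_components = {}
--     for i, p in enumerate(components):
--         element_components.setdefault(p, []).append(i)
--
--     final_dict = {k: [element_components.get(j) for j in v] for k, v in final_dict.items()}
--     for k, v in final_dict.items():
--         final_dict[k] = functools.reduce(operator.iconcat, v, [])
--
--     return final_dict
-- ===== SOURCE B (Python) =====
-- def first_fit_strategy(components, k):
--     # Counting sort replaces the comparison sort: components are bucketed by
--     # their size, then a single descending sweep over the possible sizes deals
--     # them into folds with a running counter (no sorted(), no enumerate over a
--     # sorted list, no reduce/iconcat flattening).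
--     member = {}
--     for i, c in enumerate(components):
--         member.setdefault(c, []).append(i)
--     buckets = {}
--     for c, idxs in member.items():
--         buckets.setdefault(len(idxs), []).append(c)
--     folds = {}
--     i = 0
--     for cnt in range(len(components), 0, -1):
--         for c in buckets.get(cnt, []):
--             folds.setdefault(i % k, []).extend(member[c])
--             i += 1
--     return folds
-- ===== Notes on version B (the rewrite author's own statement) =====
-- stated objective: alternative
-- what changed: B replaces A's comparison sort of Counter items by a counting sort (components bucketed by size, one descending sweep over sizes with a running counter dealing member-index lists straight into the folds), eliminating sorted(), the enumerate over the sorted list, the intermediate fold->components dict and the functools.reduce/iconcat flattening; the stable tie order is preserved because buckets keep first-occurrence order.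
import Mathlib
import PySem

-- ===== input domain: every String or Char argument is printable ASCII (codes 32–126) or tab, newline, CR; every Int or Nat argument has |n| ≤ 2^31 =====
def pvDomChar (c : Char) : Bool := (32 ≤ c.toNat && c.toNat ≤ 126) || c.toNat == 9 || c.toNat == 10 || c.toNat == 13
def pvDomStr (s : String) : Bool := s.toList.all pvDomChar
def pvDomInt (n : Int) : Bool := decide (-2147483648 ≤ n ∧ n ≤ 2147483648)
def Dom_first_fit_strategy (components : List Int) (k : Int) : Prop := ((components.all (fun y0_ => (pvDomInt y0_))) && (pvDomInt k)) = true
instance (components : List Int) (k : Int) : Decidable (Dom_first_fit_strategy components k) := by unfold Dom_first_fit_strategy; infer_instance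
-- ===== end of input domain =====

-- B replaces A's comparison sort of the Counter items by a counting sort — components are
-- bucketed by size and one descending sweep over the sizes deals the member-index lists
-- straight into the folds with a running counter — eliminating sorted(), the intermediate
-- fold→components dict and the reduce/iconcat flattening (objective: alternative algorithm).

-- ===== PORT A =====
def first_fit_strategy (components : List Int) (k : Int) : List (Int × List Int) :=
  -- integers = Counter(components)
  let integers := PySem.Dict.counter components
  -- sorted_components = sorted(integers.items(), key=lambda item: item[1], reverse=True)
  let sorted_components := PySem.List.sorted integers.items (fun item => item.2) true
  -- for i, p in enumerate(sorted_components): final_dict.setdefault(i % k, []).append(p[0])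
  let final_dict :=
    (PySem.List.enumerate sorted_components).foldl
      (fun d ip => d.modify (PySem.Int.mod ip.1 k) [] (fun v => v ++ [ip.2.1]))
      PySem.Dict.empty
  -- for i, p in enumerate(components): element_components.setdefault(p, []).append(i)
  let element_components :=
    (PySem.List.enumerate components).foldl
      (fun d ip => d.modify ip.2 [] (fun v => v ++ [ip.1]))
      PySem.Dict.empty
  -- final_dict = {k: [element_components.get(j) for j in v] for k, v in final_dict.items()}
  -- (a dict comprehension over the distinct keys of final_dict, in their order)
  let final_dict2 :=
    final_dict.items.foldl
      (fun d kv => d.insert kv.1 (kv.2.map (fun j => element_components.get? j)))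
      PySem.Dict.empty
  -- for k, v in final_dict.items(): final_dict[k] = functools.reduce(operator.iconcat, v, [])
  -- (in-place overwrite keeps each key's position; .get(j) is never None here — every j is a
  -- key of element_components — so reduce's '+=' is ported as appending o.getD [], exact on
  -- every reachable value)
  let final_dict3 :=
    final_dict2.items.foldl
      (fun d kv => d.insert kv.1 (kv.2.foldl (fun acc o => acc ++ o.getD []) []))
      PySem.Dict.empty
  final_dict3.items

-- ===== PORT B =====
def first_fit_strategy_alt (components : List Int) (k : Int) : List (Int × List Int) :=
  -- for i, c in enumerate(components): member.setdefault(c, []).append(i)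
  let member :=
    (PySem.List.enumerate components).foldl
      (fun d ic => d.modify ic.2 [] (fun v => v ++ [ic.1]))
      PySem.Dict.empty
  -- for c, idxs in member.items(): buckets.setdefault(len(idxs), []).append(c)
  let buckets :=
    member.items.foldl
      (fun d kv => d.modify ((kv.2.length : Int)) [] (fun v => v ++ [kv.1]))
      PySem.Dict.empty
  -- i = 0
  -- for cnt in range(len(components), 0, -1):
  --   for c in buckets.get(cnt, []):
  --     folds.setdefault(i % k, []).extend(member[c]); i += 1
  -- (member[c] is ported as getD with default []: c is always a key of member, so the
  --  KeyError branch is unreachable and the port is exact on every reachable value)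
  let st :=
    (PySem.List.pyRange (components.length : Int) 0 (-1)).foldl
      (fun st cnt =>
        (buckets.getD cnt []).foldl
          (fun st2 c =>
            (st2.1 + 1,
             st2.2.modify (PySem.Int.mod st2.1 k) [] (fun v => v ++ member.getD c [])))
          st)
      ((0 : Int), (PySem.Dict.empty : PySem.Dict Int (List Int)))
  st.2.items

-- ===== PRECONDITION & SPEC =====
-- Pre_ excludes only the inputs where the Python A raises: a non-empty components list with
-- k = 0 makes 'i % k' raise ZeroDivisionError (B raises there too).
def Pre_first_fit_strategy (components : List Int) (k : Int) : Prop :=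
  components = [] ∨ k ≠ 0
instance (components : List Int) (k : Int) : Decidable (Pre_first_fit_strategy components k) := by
  unfold Pre_first_fit_strategy; infer_instance

def pvWitness_first_fit_strategy : List Int × Int := ([3, 1, 1, 2, 2, 2, 3], 3)

def Spec_first_fit_strategy (components : List Int) (k : Int) (out : List (Int × List Int)) : Prop :=
  out = first_fit_strategy_alt components k
instance (components : List Int) (k : Int) (out : List (Int × List Int)) :
    Decidable (Spec_first_fit_strategy components k out) := by
  unfold Spec_first_fit_strategy; infer_instance

-- ===== CLAIM (what is proved, stated in full; the proofs are below) =====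
def Claim_equal_first_fit_strategy : Prop :=
  ∀ (components : List Int) (k : Int), Dom_first_fit_strategy components k →
    Pre_first_fit_strategy components k →
    Spec_first_fit_strategy components k (first_fit_strategy components k)

-- ===== LEMMAS AND PROOFS =====

-- indices of the samples lying in component c, in order (the value member[c] / element_components[c])
def pvGrp (components : List Int) (c : Int) : List Int :=
  ((PySem.List.enumerate components).filter (fun ip => ip.2 == c)).flatMap (fun ip => [ip.1])

-- the items list produced by a 'setdefault(key(x), []) += w(x)' grouping loop
def pvGroup {β : Type} (l : List β) (keyf : β → Int) (w : β → List Int) : List (Int × List Int) :=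
  (PySem.Set.ofList (l.map keyf)).map
    (fun q => (q, (l.filter (fun x => keyf x == q)).flatMap w))

lemma map_fst_pvGroup {β : Type} (l : List β) (keyf : β → Int) (w : β → List Int) :
    (pvGroup l keyf w).map (fun p => p.1) = PySem.Set.ofList (l.map keyf) := by
  unfold pvGroup; rw [List.map_map]
  have h : ((fun p : Int × List Int => p.1) ∘
      (fun q => (q, (l.filter (fun x => keyf x == q)).flatMap w))) = fun q => q := rfl
  rw [h]
  exact List.map_id' _

lemma items_group {β : Type} (l : List β) (keyf : β → Int) (w : β → List Int) :
    (l.foldl (fun d x => d.modify (keyf x) [] (fun v => v ++ w x)) PySem.Dict.empty).items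
      = pvGroup l keyf w := by
  induction l using List.reverseRecOn with
  | nil => rfl
  | append_singleton l x ih =>
    rw [List.foldl_append, List.foldl_cons, List.foldl_nil]
    set D := List.foldl (fun d x => d.modify (keyf x) [] (fun v => v ++ w x)) PySem.Dict.empty l with hDdef
    have hkeys :
        D.keys = PySem.Set.ofList (l.map keyf) := by
      simp only [PySem.Dict.keys]; rw [ih, map_fst_pvGroup]
    have hnd : D.keys.Nodup := by
      rw [hkeys]; exact PySem.Set.nodup_ofList _
    have hof : PySem.Set.ofList ((l ++ [x]).map keyf)
        = PySem.Set.add (PySem.Set.ofList (l.map keyf)) (keyf x) := by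
      rw [List.map_append, PySem.Set.ofList_eq_foldl, List.foldl_append,
        ← PySem.Set.ofList_eq_foldl]
      rfl
    by_cases hmem : keyf x ∈ l.map keyf
    · have hcont : D.contains (keyf x) = true := by
        rw [PySem.Dict.contains_eq_decide_mem_keys, hkeys]
        simp [PySem.Set.mem_ofList, hmem]
      have hgetD : D.getD (keyf x) []
            = (l.filter (fun z => keyf z == keyf x)).flatMap w := by
        apply PySem.Dict.getD_of_mem_items _ ?_ hnd
        rw [ih]; unfold pvGroup
        exact List.mem_map.mpr ⟨keyf x, (PySem.Set.mem_ofList _ _).mpr hmem, rfl⟩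
      have hadd : PySem.Set.add (PySem.Set.ofList (l.map keyf)) (keyf x)
          = PySem.Set.ofList (l.map keyf) := by
        simp [PySem.Set.add, PySem.Set.contains,
          (PySem.Set.mem_ofList (l.map keyf) (keyf x)).mpr hmem]
      simp only [PySem.Dict.modify]
      rw [PySem.Dict.items_insert, if_pos hcont, hgetD, ih]
      unfold pvGroup
      rw [List.map_map, hof, hadd]
      apply List.map_congr_left
      intro q _
      by_cases hqx : q = keyf x
      · subst hqx
        simp [List.filter_append, List.flatMap_append, List.filter]
      · have h1 : (q == keyf x) = false := by simp [hqx]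
        have h2 : (keyf x == q) = false := by simp [Ne.symm hqx]
        simp [Function.comp, h1, h2, List.filter_append, List.filter]
    · have hcont : D.contains (keyf x) = false := by
        rw [PySem.Dict.contains_eq_decide_mem_keys, hkeys]
        simp [PySem.Set.mem_ofList, hmem]
      have hgetD : D.getD (keyf x) [] = [] :=
        PySem.Dict.getD_of_not_contains _ [] hcont
      have hadd : PySem.Set.add (PySem.Set.ofList (l.map keyf)) (keyf x)
          = PySem.Set.ofList (l.map keyf) ++ [keyf x] := by
        simp only [PySem.Set.add]
        rw [if_neg]
        simp [PySem.Set.contains, PySem.Set.mem_ofList, hmem]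
      simp only [PySem.Dict.modify]
      rw [PySem.Dict.items_insert, if_neg (by simp [hcont]), hgetD, ih]
      unfold pvGroup
      rw [hof, hadd, List.map_append]
      congr 1
      · apply List.map_congr_left
        intro q hq
        have hq' : q ∈ l.map keyf := (PySem.Set.mem_ofList _ _).mp hq
        have h2 : (keyf x == q) = false := by
          simp only [beq_eq_false_iff_ne, ne_eq]
          rintro rfl; exact hmem hq'
        simp [List.filter_append, List.filter, h2]
      · have hfl : l.filter (fun z => keyf z == keyf x) = [] := by
          rw [List.filter_eq_nil_iff]
          intro z hz hb
          exact hmem (by rw [← (beq_iff_eq).mp hb]; exact List.mem_map_of_mem hz)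
        simp [List.filter_append, List.flatMap_append, List.filter, hfl]

lemma keys_group {β : Type} (l : List β) (keyf : β → Int) (w : β → List Int) :
    (l.foldl (fun d x => d.modify (keyf x) [] (fun v => v ++ w x)) PySem.Dict.empty).keys
      = PySem.Set.ofList (l.map keyf) := by
  simp only [PySem.Dict.keys]; rw [items_group, map_fst_pvGroup]

lemma getD_group {β : Type} (l : List β) (keyf : β → Int) (w : β → List Int) (c : Int) :
    (l.foldl (fun d x => d.modify (keyf x) [] (fun v => v ++ w x)) PySem.Dict.empty).getD c []
      = (l.filter (fun x => keyf x == c)).flatMap w := by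
  by_cases h : c ∈ l.map keyf
  · apply PySem.Dict.getD_of_mem_items _ ?_ (by rw [keys_group]; exact PySem.Set.nodup_ofList _)
    rw [items_group]; unfold pvGroup
    exact List.mem_map.mpr ⟨c, (PySem.Set.mem_ofList _ _).mpr h, rfl⟩
  · have hfl : l.filter (fun x => keyf x == c) = [] := by
      rw [List.filter_eq_nil_iff]
      intro z hz hb
      exact h (by rw [← (beq_iff_eq).mp hb]; exact List.mem_map_of_mem hz)
    rw [hfl, List.flatMap_nil]
    apply PySem.Dict.getD_of_not_contains
    rw [PySem.Dict.contains_eq_decide_mem_keys, keys_group]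
    simp [PySem.Set.mem_ofList, h]

lemma get?_group {β : Type} (l : List β) (keyf : β → Int) (w : β → List Int) (c : Int)
    (h : c ∈ l.map keyf) :
    (l.foldl (fun d x => d.modify (keyf x) [] (fun v => v ++ w x)) PySem.Dict.empty).get? c
      = some ((l.filter (fun x => keyf x == c)).flatMap w) := by
  apply PySem.Dict.get?_of_mem_items _ ?_ (by rw [keys_group]; exact PySem.Set.nodup_ofList _)
  rw [items_group]; unfold pvGroup
  exact List.mem_map.mpr ⟨c, (PySem.Set.mem_ofList _ _).mpr h, rfl⟩

lemma flatMap_singleton_eq_map {α β : Type} (f : α → β) (l : List α) :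
    l.flatMap (fun x => [f x]) = l.map f := by
  induction l with
  | nil => rfl
  | cons x xs ih => simp [List.flatMap_cons, ih]

lemma pvGrp_length (components : List Int) (c : Int) :
    (pvGrp components c).length = components.count c := by
  unfold pvGrp
  rw [flatMap_singleton_eq_map, List.length_map, ← List.countP_eq_length_filter]
  conv_rhs => rw [← PySem.List.map_snd_enumerate components 0]
  rw [List.count_eq_countP, List.countP_map]
  rfl

lemma insertBy_map {α β : Type} (f : α → β) (before : β → β → Bool) (x : α) (ys : List α) :
    PySem.List.insertBy before (f x) (ys.map f)
      = (PySem.List.insertBy (fun a b => before (f a) (f b)) x ys).map f := by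
  induction ys with
  | nil => rfl
  | cons y ys ih =>
    simp only [List.map_cons, PySem.List.insertBy]
    split_ifs <;> simp [ih]

lemma sorted_map {α β κ : Type} [LT κ] [DecidableLT κ] (f : α → β) (xs : List α) (key : β → κ) :
    PySem.List.sorted (xs.map f) key true
      = (PySem.List.sorted xs (fun a => key (f a)) true).map f := by
  rw [PySem.List.sorted_rev_eq_foldl_insertBy, PySem.List.sorted_rev_eq_foldl_insertBy,
    List.foldl_map]
  suffices h : ∀ ys : List α,
      List.foldl (fun acc x => PySem.List.insertBy (fun a b => decide (key b < key a)) (f x) acc)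
        (ys.map f) xs
      = (List.foldl (fun acc x =>
          PySem.List.insertBy (fun a b => decide (key (f b) < key (f a))) x acc) ys xs).map f by
    simpa using h []
  induction xs with
  | nil => intro ys; rfl
  | cons x xs ih =>
    intro ys
    rw [List.foldl_cons, List.foldl_cons, insertBy_map, ih]

lemma sorted_keyiso {α : Type} (xs : List α) (k1 : α → Int) (k2 : α → Nat)
    (h : ∀ a b, k1 a < k1 b ↔ k2 a < k2 b) :
    PySem.List.sorted xs k1 true = PySem.List.sorted xs k2 true := by
  rw [PySem.List.sorted_rev_eq_foldl_insertBy, PySem.List.sorted_rev_eq_foldl_insertBy]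
  have hb : (fun a b => decide (k1 b < k1 a)) = (fun a b => decide (k2 b < k2 a)) := by
    funext a b
    exact decide_eq_decide.mpr (h b a)
  rw [hb]

lemma enumerate_map {α β : Type} (f : α → β) (xs : List α) (s : Int) :
    PySem.List.enumerate (xs.map f) s
      = (PySem.List.enumerate xs s).map (fun p => (p.1, f p.2)) := by
  induction xs generalizing s with
  | nil => rfl
  | cons x xs ih => simp [PySem.List.enumerate_cons, ih]

lemma flatMap_congr_mem {α β : Type} (l : List α) (f g : α → List β)
    (h : ∀ a ∈ l, f a = g a) : l.flatMap f = l.flatMap g := by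
  induction l with
  | nil => rfl
  | cons x xs ih =>
    rw [List.flatMap_cons, List.flatMap_cons, h x (List.mem_cons_self),
      ih (fun a ha => h a (List.mem_cons_of_mem _ ha))]

-- insertBy skips a prefix it must not go before
lemma insertBy_append_left {α : Type} (before : α → α → Bool) (x : α) :
    ∀ (l1 l2 : List α), (∀ y ∈ l1, before x y = false) →
      PySem.List.insertBy before x (l1 ++ l2) = l1 ++ PySem.List.insertBy before x l2 := by
  intro l1
  induction l1 with
  | nil => intro l2 _; rfl
  | cons y ys ih =>
    intro l2 h
    simp only [List.cons_append, PySem.List.insertBy]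
    rw [if_neg (by simp [h y (List.mem_cons_self)]),
      ih l2 (fun z hz => h z (List.mem_cons_of_mem _ hz))]

-- insertBy lands in front of a list it goes before
lemma insertBy_eq_cons {α : Type} (before : α → α → Bool) (x : α) (l : List α)
    (h : ∀ y ∈ l, before x y = true) :
    PySem.List.insertBy before x l = x :: l := by
  cases l with
  | nil => rfl
  | cons y ys =>
    simp only [PySem.List.insertBy]
    rw [if_pos (h y (List.mem_cons_self))]

-- inserting x into a concatenation of strictly-descending key buckets appends x to its bucket
lemma insertBy_buckets {α : Type} (keyf : α → Int) (x : α) :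
    ∀ (cnts : List Int) (ys : List α), cnts.Pairwise (fun a b => b < a) → keyf x ∈ cnts →
      PySem.List.insertBy (fun a b => decide (keyf b < keyf a)) x
          (cnts.flatMap (fun c => ys.filter (fun y => keyf y == c)))
        = cnts.flatMap (fun c => (ys ++ [x]).filter (fun y => keyf y == c)) := by
  intro cnts
  induction cnts with
  | nil => intro ys _ hx; cases hx
  | cons c rest ih =>
    intro ys hpw hx
    have hlt : ∀ b ∈ rest, b < c := (List.pairwise_cons.mp hpw).1
    have hrest : rest.Pairwise (fun a b => b < a) := (List.pairwise_cons.mp hpw).2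
    have hbucket_key : ∀ y ∈ ys.filter (fun y => keyf y == c), keyf y = c := by
      intro y hy
      have := (List.mem_filter.mp hy).2
      simpa using this
    rw [List.flatMap_cons, List.flatMap_cons]
    by_cases hxc : keyf x = c
    · -- x belongs to the head bucket: skip it, then land right after it
      rw [insertBy_append_left _ _ _ _ (by
        intro y hy
        simp [hbucket_key y hy, hxc])]
      rw [insertBy_eq_cons _ _ _ (by
        intro y hy
        obtain ⟨c', hc', hy'⟩ := List.mem_flatMap.mp hy
        have : keyf y = c' := by
          have := (List.mem_filter.mp hy').2
          simpa using this
        simp only [decide_eq_true_eq]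
        rw [this, hxc]
        exact hlt c' hc')]
      have hhead : (ys ++ [x]).filter (fun y => keyf y == c)
          = ys.filter (fun y => keyf y == c) ++ [x] := by
        rw [List.filter_append]
        simp [List.filter, hxc]
      have htail : rest.flatMap (fun c' => (ys ++ [x]).filter (fun y => keyf y == c'))
          = rest.flatMap (fun c' => ys.filter (fun y => keyf y == c')) := by
        apply flatMap_congr_mem
        intro c' hc'
        rw [List.filter_append]
        have : (keyf x == c') = false := by
          simp only [beq_eq_false_iff_ne, ne_eq]
          rw [hxc]
          exact fun h => absurd (h ▸ hlt c' hc') (lt_irrefl c)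
        simp [List.filter, this]
      rw [hhead, htail]
      simp
    · -- x belongs to a later bucket: skip the head bucket and recurse
      have hxr : keyf x ∈ rest := by
        cases List.mem_cons.mp hx with
        | inl h => exact absurd h hxc
        | inr h => exact h
      have hxlt : keyf x < c := hlt _ hxr
      rw [insertBy_append_left _ _ _ _ (by
        intro y hy
        have := hbucket_key y hy
        simp only [decide_eq_false_iff_not, not_lt, this]
        exact le_of_lt hxlt)]
      rw [ih ys hrest hxr]
      have hhead : (ys ++ [x]).filter (fun y => keyf y == c)
          = ys.filter (fun y => keyf y == c) := by
        have hfx : (keyf x == c) = false := by simp [hxc]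
        rw [List.filter_append]
        simp [List.filter, hfx]
      rw [hhead]

-- stable descending sort by an Int key = counting sort: concatenate the key buckets
-- in strictly decreasing key order
lemma sorted_rev_eq_flatMap_filter {α : Type} (keyf : α → Int) :
    ∀ (ys : List α) (cnts : List Int), cnts.Pairwise (fun a b => b < a) →
      (∀ y ∈ ys, keyf y ∈ cnts) →
      PySem.List.sorted ys keyf true
        = cnts.flatMap (fun c => ys.filter (fun y => keyf y == c)) := by
  intro ys
  induction ys using List.reverseRecOn with
  | nil =>
    intro cnts _ _
    rw [PySem.List.sorted_rev_eq_foldl_insertBy]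
    simp
  | append_singleton ys x ih =>
    intro cnts hpw hmem
    have hsplit : PySem.List.sorted (ys ++ [x]) keyf true
        = PySem.List.insertBy (fun a b => decide (keyf b < keyf a)) x
            (PySem.List.sorted ys keyf true) := by
      rw [PySem.List.sorted_rev_eq_foldl_insertBy, PySem.List.sorted_rev_eq_foldl_insertBy,
        List.foldl_append, List.foldl_cons, List.foldl_nil]
    rw [hsplit, ih cnts hpw (fun y hy => hmem y (List.mem_append_left _ hy))]
    exact insertBy_buckets keyf x cnts ys hpw (hmem x (List.mem_append_right _ (List.mem_cons_self)))

lemma pairwise_gt_pyRange_neg_one (a b : Int) :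
    (PySem.List.pyRange a b (-1)).Pairwise (fun x y => y < x) := by
  rw [PySem.List.pyRange_neg_one_eq_reverse, List.pairwise_reverse]
  exact PySem.List.pairwise_lt_pyRange_one _ _

-- the running-counter inner loop is a fold over enumerate
lemma flatten_inner (member : PySem.Dict Int (List Int)) (k : Int) (ys : List Int) :
    ∀ (i0 : Int) (d0 : PySem.Dict Int (List Int)),
      ys.foldl
          (fun st2 c =>
            (st2.1 + 1,
             st2.2.modify (PySem.Int.mod st2.1 k) [] (fun v => v ++ member.getD c [])))
          (i0, d0)
        = (i0 + ys.length,
           (PySem.List.enumerate ys i0).foldl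
             (fun d p => d.modify (PySem.Int.mod p.1 k) [] (fun v => v ++ member.getD p.2 []))
             d0) := by
  induction ys with
  | nil => intro i0 d0; simp [PySem.List.enumerate_nil]
  | cons y ys ih =>
    intro i0 d0
    rw [List.foldl_cons, ih, PySem.List.enumerate_cons, List.foldl_cons,
      Prod.ext_iff]
    refine ⟨by simp; omega, by simp⟩

-- the whole double loop is a fold over enumerate of the flattened bucket order
lemma flatten_B (member buckets : PySem.Dict Int (List Int)) (k : Int) (cs : List Int) :
    ∀ (i0 : Int) (d0 : PySem.Dict Int (List Int)),
      cs.foldl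
          (fun st cnt =>
            (buckets.getD cnt []).foldl
              (fun st2 c =>
                (st2.1 + 1,
                 st2.2.modify (PySem.Int.mod st2.1 k) [] (fun v => v ++ member.getD c [])))
              st)
          (i0, d0)
        = (i0 + (cs.flatMap (fun cnt => buckets.getD cnt [])).length,
           (PySem.List.enumerate (cs.flatMap (fun cnt => buckets.getD cnt [])) i0).foldl
             (fun d p => d.modify (PySem.Int.mod p.1 k) [] (fun v => v ++ member.getD p.2 []))
             d0) := by
  induction cs with
  | nil => intro i0 d0; simp [PySem.List.enumerate_nil]
  | cons c cs ih =>
    intro i0 d0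
    rw [List.foldl_cons, flatten_inner, ih, List.flatMap_cons, PySem.List.enumerate_append,
      List.foldl_append, List.length_append, Prod.ext_iff]
    refine ⟨by push_cast; ring, by push_cast; ring_nf⟩

-- ===== VERDICT (by name: the statement is the Claim_ definition above) =====
theorem first_fit_strategy_spec : Claim_equal_first_fit_strategy := by
  intro components k _ _
  show first_fit_strategy components k = first_fit_strategy_alt components k
  simp only [first_fit_strategy, first_fit_strategy_alt]
  -- shared grouping dict: element_components = member
  have hEgetD : ∀ c,
      ((PySem.List.enumerate components).foldl
        (fun d ip => d.modify ip.2 [] (fun v => v ++ [ip.1])) PySem.Dict.empty).getD c []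
        = pvGrp components c := fun c =>
    getD_group (PySem.List.enumerate components) (fun ip => ip.2) (fun ip => [ip.1]) c
  have hEkeys :
      ((PySem.List.enumerate components).foldl
        (fun d ip => d.modify ip.2 [] (fun v => v ++ [ip.1])) PySem.Dict.empty).keys
        = PySem.Set.ofList components := by
    rw [keys_group, PySem.List.map_snd_enumerate]
  have hcnt : ∀ c,
      (((PySem.List.enumerate components).foldl
        (fun d ip => d.modify ip.2 [] (fun v => v ++ [ip.1])) PySem.Dict.empty).getD c []).length
        = components.count c := fun c => by rw [hEgetD, pvGrp_length]
  -- A's sorted list of (component, count) pairs is the sorted component list, paired up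
  have hsorted :
      PySem.List.sorted (PySem.Dict.counter components).items (fun item => item.2) true
        = (PySem.List.sorted
            ((PySem.List.enumerate components).foldl
              (fun d ip => d.modify ip.2 [] (fun v => v ++ [ip.1])) PySem.Dict.empty).keys
            (fun c =>
              (((PySem.List.enumerate components).foldl
                (fun d ip => d.modify ip.2 [] (fun v => v ++ [ip.1]))
                  PySem.Dict.empty).getD c []).length) true).map
            (fun c => (c, (components.count c : Int))) := by
    rw [PySem.Dict.items_counter, sorted_map, hEkeys]
    congr 1
    apply sorted_keyiso
    intro a b
    rw [hcnt a, hcnt b]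
    omega
  rw [hsorted, enumerate_map, List.foldl_map]
  -- name the shared pieces
  set E := (PySem.List.enumerate components).foldl
      (fun d ip => d.modify ip.2 [] (fun v => v ++ [ip.1])) PySem.Dict.empty with hEdef
  set S := PySem.List.sorted E.keys (fun c => (E.getD c []).length) true with hSdef
  -- ---- B side: flatten the nested counting-sort loops and identify the traversal order with S
  rw [flatten_B]
  have hitems : E.items
      = (PySem.Set.ofList components).map (fun q => (q, pvGrp components q)) := by
    rw [hEdef, items_group]
    unfold pvGroup
    rw [PySem.List.map_snd_enumerate]
    rfl
  have hbucket : ∀ cnt,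
      (E.items.foldl
        (fun d kv => d.modify ((kv.2.length : Int)) [] (fun v => v ++ [kv.1]))
        PySem.Dict.empty).getD cnt []
      = (E.items.filter (fun kv => ((kv.2.length : Int)) == cnt)).flatMap
          (fun kv => [kv.1]) := fun cnt =>
    getD_group E.items (fun kv => ((kv.2.length : Int))) (fun kv => [kv.1]) cnt
  -- the flattened bucket order equals S
  have horder :
      (PySem.List.pyRange (components.length : Int) 0 (-1)).flatMap
        (fun cnt =>
          (E.items.foldl
            (fun d kv => d.modify ((kv.2.length : Int)) [] (fun v => v ++ [kv.1]))
            PySem.Dict.empty).getD cnt [])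
      = S := by
    have hcount :
        PySem.List.sorted E.items (fun kv => ((kv.2.length : Int))) true
          = (PySem.List.pyRange (components.length : Int) 0 (-1)).flatMap
              (fun cnt => E.items.filter (fun kv => ((kv.2.length : Int)) == cnt)) := by
      apply sorted_rev_eq_flatMap_filter _ _ _ (pairwise_gt_pyRange_neg_one _ _)
      intro kv hkv
      rw [hitems] at hkv
      obtain ⟨c, hc, rfl⟩ := List.mem_map.mp hkv
      have hcin : c ∈ components := (PySem.Set.mem_ofList _ _).mp hc
      have hlen : (pvGrp components c).length = components.count c := pvGrp_length components c
      have h1 : 0 < components.count c := List.count_pos_iff.mpr hcin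
      have h2 : components.count c ≤ components.length := List.count_le_length
      rw [PySem.List.mem_pyRange_neg_one]
      simp only [hlen]
      omega
    calc (PySem.List.pyRange (components.length : Int) 0 (-1)).flatMap
          (fun cnt =>
            (E.items.foldl
              (fun d kv => d.modify ((kv.2.length : Int)) [] (fun v => v ++ [kv.1]))
              PySem.Dict.empty).getD cnt [])
        = (PySem.List.pyRange (components.length : Int) 0 (-1)).flatMap
            (fun cnt =>
              (E.items.filter (fun kv => ((kv.2.length : Int)) == cnt)).map
                (fun kv => kv.1)) := by
          apply flatMap_congr_mem
          intro cnt _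
          rw [hbucket, flatMap_singleton_eq_map]
      _ = ((PySem.List.pyRange (components.length : Int) 0 (-1)).flatMap
            (fun cnt => E.items.filter (fun kv => ((kv.2.length : Int)) == cnt))).map
            (fun kv => kv.1) := by
          rw [List.map_flatMap]
      _ = (PySem.List.sorted E.items (fun kv => ((kv.2.length : Int))) true).map
            (fun kv => kv.1) := by rw [hcount]
      _ = S := by
          rw [hitems, sorted_map, List.map_map]
          have hfst : ((fun kv : Int × List Int => kv.1) ∘
              (fun q => (q, pvGrp components q))) = fun q => q := rfl
          rw [hfst, List.map_id']
          rw [hSdef, hEkeys]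
          have hk : (fun c => ((E.getD c []).length)) = fun c => (pvGrp components c).length := by
            funext c; rw [hEgetD]
          rw [hk]
          exact sorted_keyiso _ _ _ (fun a b => Int.ofNat_lt)
  rw [horder]
  -- ---- both sides are now round-robin grouping loops over enumerate S
  set L := PySem.List.enumerate S with hLdef
  have hfB : (fun (d : PySem.Dict Int (List Int)) (p : Int × Int) =>
        d.modify (PySem.Int.mod p.1 k) [] (fun v => v ++ E.getD p.2 []))
      = (fun d p => d.modify (PySem.Int.mod p.1 k) [] (fun v => v ++ pvGrp components p.2)) := by
    funext d p
    rw [hEgetD]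
  rw [hfB]
  -- both round-robin loops are grouping loops
  have hdA : (L.foldl (fun d p =>
        d.modify (PySem.Int.mod p.1 k) [] (fun v => v ++ [p.2])) PySem.Dict.empty).items
      = pvGroup L (fun p => PySem.Int.mod p.1 k) (fun p => [p.2]) :=
    items_group L (fun p => PySem.Int.mod p.1 k) (fun p => [p.2])
  have hdB : (L.foldl (fun d p =>
        d.modify (PySem.Int.mod p.1 k) [] (fun v => v ++ pvGrp components p.2)) PySem.Dict.empty).items
      = pvGroup L (fun p => PySem.Int.mod p.1 k) (fun p => pvGrp components p.2) :=
    items_group L (fun p => PySem.Int.mod p.1 k) (fun p => pvGrp components p.2)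
  rw [hdB, hdA]
  -- the two post-processing passes of A are appends of fresh distinct keys
  have hnodup : ((pvGroup L (fun p => PySem.Int.mod p.1 k)
      (fun p => [p.2])).map (fun p => p.1)).Nodup := by
    rw [map_fst_pvGroup]
    exact PySem.Set.nodup_ofList _
  have h2 : ((pvGroup L (fun p => PySem.Int.mod p.1 k) (fun p => [p.2])).foldl
        (fun d kv => d.insert kv.1 (kv.2.map (fun j => E.get? j))) PySem.Dict.empty).items
      = (pvGroup L (fun p => PySem.Int.mod p.1 k) (fun p => [p.2])).map
          (fun kv => (kv.1, kv.2.map (fun j => E.get? j))) := by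
    have := PySem.Dict.items_foldl_insert_fresh
      (pvGroup L (fun p => PySem.Int.mod p.1 k) (fun p => [p.2]))
      (fun kv => kv.1) (fun kv => kv.2.map (fun j => E.get? j)) PySem.Dict.empty
      (fun a _ => PySem.Dict.contains_empty _) hnodup
    simpa using this
  rw [h2]
  have hnodup2 : (((pvGroup L (fun p => PySem.Int.mod p.1 k) (fun p => [p.2])).map
      (fun kv => (kv.1, kv.2.map (fun j => E.get? j)))).map (fun p => p.1)).Nodup := by
    rw [List.map_map]
    exact hnodup
  have h3 : (((pvGroup L (fun p => PySem.Int.mod p.1 k) (fun p => [p.2])).map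
        (fun kv => (kv.1, kv.2.map (fun j => E.get? j)))).foldl
        (fun d kv => d.insert kv.1 (kv.2.foldl (fun acc o => acc ++ o.getD []) []))
        PySem.Dict.empty).items
      = ((pvGroup L (fun p => PySem.Int.mod p.1 k) (fun p => [p.2])).map
          (fun kv => (kv.1, kv.2.map (fun j => E.get? j)))).map
          (fun kv => (kv.1, kv.2.foldl (fun acc o => acc ++ o.getD []) [])) := by
    have := PySem.Dict.items_foldl_insert_fresh
      ((pvGroup L (fun p => PySem.Int.mod p.1 k) (fun p => [p.2])).map
        (fun kv => (kv.1, kv.2.map (fun j => E.get? j))))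
      (fun kv => kv.1) (fun kv => kv.2.foldl (fun acc o => acc ++ o.getD []) []) PySem.Dict.empty
      (fun a _ => PySem.Dict.contains_empty _) hnodup2
    simpa using this
  rw [h3, List.map_map]
  unfold pvGroup
  rw [List.map_map]
  apply List.map_congr_left
  intro q _
  simp only [Function.comp_apply]
  -- per fold: flattening A's per-component index lists is B's direct extension
  rw [flatMap_singleton_eq_map]
  have hmapq : ((L.filter (fun p => PySem.Int.mod p.1 k == q)).map (fun p => p.2)).map
        (fun j => E.get? j)
      = ((L.filter (fun p => PySem.Int.mod p.1 k == q)).map (fun p => p.2)).map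
        (fun j => some (pvGrp components j)) := by
    apply List.map_congr_left
    intro j hj
    obtain ⟨p, hp, rfl⟩ := List.mem_map.mp hj
    have hpL : p ∈ L := List.mem_of_mem_filter hp
    have hjS : p.2 ∈ S := by
      rw [← PySem.List.map_snd_enumerate S 0, ← hLdef]
      exact List.mem_map_of_mem hpL
    have hjc : p.2 ∈ components := by
      have h1 := (PySem.List.mem_sorted _ _ _ _).mp (hSdef ▸ hjS)
      rw [hEkeys] at h1
      exact (PySem.Set.mem_ofList _ _).mp h1
    rw [hEdef]
    exact get?_group _ _ _ _ (by rw [PySem.List.map_snd_enumerate]; exact hjc)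
  rw [hmapq, PySem.List.foldl_append_eq_flatMap, List.nil_append, List.flatMap_map,
    List.flatMap_map]
  simp only [Option.getD_some]
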